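-- pv_equiv track=rewrite | github.com/spankybot/spanky.py | common/src/SpankyCommon/utils/time_utils.py | sec_to_human
-- ===== SOURCE A (Python) =====
-- interval_units = [(60, "minute"), (60, "hour"), (24, "day"), (365, "year")]
--
-- def sec_to_human(sec):
--     """
--     Convert seconds to human readable strings (e.g. 100 seconds to 1 minute, 40 seconds)
--     """
--     if sec == 0:
--         return "0 seconds"
--
--     parts = [[int(sec), "second"]]
--     for (dur, unit) in interval_units:
--         last = parts[-1]
--         if last[0] == 0:
--             break
--
--         val = last[0] // dur
--         parts[-1][0] -= val * dur
--
--         parts.append([val, unit])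
--
--     done = 0
--     res = []
--     for val, unit in reversed(parts):
--         if len(res) > 0:
--             done += 1
--             if done == 2:
--                 break
--
--         if val == 0:
--             continue
--
--         if val > 1:
--             unit += "s"
--
--         part_fmt = "%d %s" % (val, unit)
--         res.append(part_fmt)
--
--     return ", ".join(res)
-- ===== SOURCE B (Python) =====
-- def _fmt(val, name):
--     return "%d %s" % (val, name + ("s" if val > 1 else ""))
--
-- def sec_to_human(sec):
--     """
--     Convert seconds to human readable strings (e.g. 100 seconds to 1 minute, 40 seconds)
--     """
--     if sec == 0:
--         return "0 seconds"
--     s = int(sec)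
--     units = [("year", s // 31536000), ("day", (s // 86400) % 365),
--              ("hour", (s // 3600) % 24), ("minute", (s // 60) % 60),
--              ("second", s % 60)]
--     for i, (name, val) in enumerate(units):
--         if val != 0:
--             res = [_fmt(val, name)]
--             if i + 1 < len(units) and units[i + 1][1] != 0:
--                 res.append(_fmt(*units[i + 1][::-1]))
--             return ", ".join(res)
--     return ""
-- ===== Notes on version B (the rewrite author's own statement) =====
-- stated objective: simpler
-- what changed: Replaces A's remainder-carrying build loop over interval_units plus the two-phase reversed formatting scan with a `done` counter by a closed-form list of unit values from fixed cumulative divisors (//31536000, //86400%365, ...) and a single scan that formats the first non-zero unit and, if non-zero, the immediately next one.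
import Mathlib
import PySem

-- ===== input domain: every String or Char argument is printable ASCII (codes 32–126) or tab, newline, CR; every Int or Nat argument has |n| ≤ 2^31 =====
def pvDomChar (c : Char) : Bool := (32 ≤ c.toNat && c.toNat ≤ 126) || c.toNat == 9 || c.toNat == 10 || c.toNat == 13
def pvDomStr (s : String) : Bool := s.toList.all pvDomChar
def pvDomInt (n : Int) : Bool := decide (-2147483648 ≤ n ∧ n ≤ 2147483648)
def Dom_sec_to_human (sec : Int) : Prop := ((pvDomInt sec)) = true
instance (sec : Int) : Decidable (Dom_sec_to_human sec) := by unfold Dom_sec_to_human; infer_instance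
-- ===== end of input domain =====

-- B replaces A's remainder-carrying build loop + two-phase reversed formatting scan by
-- closed-form cumulative-divisor unit values and a single first-nonzero scan (objective: simpler).


-- ===== PORT A =====
-- interval_units
def pvUnits : List (Int × String) := [(60, "minute"), (60, "hour"), (24, "day"), (365, "year")]

-- A's first loop. `parts` is kept in REVERSED order (head = parts[-1]): python's
-- `parts.append(x)` is cons, `parts[-1]` is the head, and the in-place
-- `parts[-1][0] -= val * dur` rebuilds the head; `break` on last[0] == 0 returns the list.
def pvBuild : List (Int × String) → List (Int × String) → List (Int × String)
  | rparts, [] => rparts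
  | [], _ :: _ => []
  | (lv, lu) :: tail, (dur, unit) :: rest =>
    if lv = 0 then (lv, lu) :: tail
    else pvBuild ((PySem.Int.floordiv lv dur, unit) ::
                  (lv - PySem.Int.floordiv lv dur * dur, lu) :: tail) rest

-- A's second loop over `reversed(parts)` (the reversed representation, read head first),
-- with the `done` counter and the break at done == 2.
def pvFormat : List (Int × String) → Int → List String → List String
  | [], _, res => res
  | (v, u) :: rest, done, res =>
    if 0 < res.length then
      if done + 1 = 2 then res
      else if v = 0 then pvFormat rest (done + 1) res
      else pvFormat rest (done + 1)
             (res ++ [PySem.Int.toStr v ++ " " ++ (if 1 < v then u ++ "s" else u)])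
    else if v = 0 then pvFormat rest done res
    else pvFormat rest done
           (res ++ [PySem.Int.toStr v ++ " " ++ (if 1 < v then u ++ "s" else u)])

def sec_to_human (sec : Int) : String :=
  if sec = 0 then "0 seconds"
  else PySem.Str.join ", " (pvFormat (pvBuild [(sec, "second")] pvUnits) 0 [])

-- ===== PORT B =====
def pvFmt (val : Int) (name : String) : String :=
  PySem.Int.toStr val ++ " " ++ (name ++ (if 1 < val then "s" else ""))

-- B's scan: first unit with non-zero value, plus the immediately next unit if non-zero.
def pvScan : List (String × Int) → String
  | [] => ""
  | (name, v) :: rest =>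
    if v ≠ 0 then
      PySem.Str.join ", "
        (pvFmt v name ::
          (match rest with
           | (n2, v2) :: _ => if v2 ≠ 0 then [pvFmt v2 n2] else []
           | [] => []))
    else pvScan rest

def sec_to_human_alt (sec : Int) : String :=
  if sec = 0 then "0 seconds"
  else pvScan
    [("year",   PySem.Int.floordiv sec 31536000),
     ("day",    PySem.Int.mod (PySem.Int.floordiv sec 86400) 365),
     ("hour",   PySem.Int.mod (PySem.Int.floordiv sec 3600) 24),
     ("minute", PySem.Int.mod (PySem.Int.floordiv sec 60) 60),
     ("second", PySem.Int.mod sec 60)]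

-- ===== PRECONDITION & SPEC =====
def Spec_sec_to_human (sec : Int) (out : String) : Prop := out = sec_to_human_alt sec
instance (sec : Int) (out : String) : Decidable (Spec_sec_to_human sec out) := by unfold Spec_sec_to_human; infer_instance

-- ===== CLAIM (what is proved, stated in full; the proofs are below) =====
def Claim_equal_sec_to_human : Prop := ∀ (sec : Int), Dom_sec_to_human sec → Spec_sec_to_human sec (sec_to_human sec)

-- ===== LEMMAS AND PROOFS =====

-- aligns A's `unit += "s"` (whole-unit if) with B's suffix-only if
theorem pv_if_s (v : Int) (u : String) :
    u ++ (if 1 < v then "s" else "") = (if 1 < v then u ++ "s" else u) := by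
  split_ifs <;> simp

-- ===== VERDICT (by name: the statement is the Claim_ definition above) =====
theorem sec_to_human_spec : Claim_equal_sec_to_human := by
  intro sec _
  unfold Spec_sec_to_human sec_to_human sec_to_human_alt
  by_cases hs : sec = 0
  · simp [hs]
  · rw [if_neg hs, if_neg hs]
    by_cases h1 : sec / 60 = 0
    · have h2 : sec / 3600 = 0 := by omega
      have h3 : sec / 86400 = 0 := by omega
      have h4 : sec / 31536000 = 0 := by omega
      have hm0 : sec % 60 = sec := by omega
      simp [pvBuild, pvUnits, pvFormat, pvScan, pvFmt, pv_if_s, hs, h1, h2, h3, h4, hm0]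
    · by_cases h2 : sec / 3600 = 0
      · have e2 : sec / 60 / 60 = sec / 3600 := by omega
        have h3 : sec / 86400 = 0 := by omega
        have h4 : sec / 31536000 = 0 := by omega
        have hm1 : sec / 60 % 60 = sec / 60 := by omega
        have hsub : sec - sec / 60 * 60 = sec % 60 := by omega
        by_cases hr0 : (60:Int) ∣ sec <;>
          simp [pvBuild, pvUnits, pvFormat, pvScan, pvFmt, pv_if_s, hs, h1, e2, h2, h3, h4,
            hm1, hsub, hr0]
      · by_cases h3 : sec / 86400 = 0
        · have e2 : sec / 60 / 60 = sec / 3600 := by omega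
          have e3 : sec / 3600 / 24 = sec / 86400 := by omega
          have h4 : sec / 31536000 = 0 := by omega
          have hm2 : sec / 3600 % 24 = sec / 3600 := by omega
          have hsub1 : sec / 60 - sec / 3600 * 60 = sec / 60 % 60 := by omega
          by_cases hr1 : (60:Int) ∣ sec / 60 <;>
            simp [pvBuild, pvUnits, pvFormat, pvScan, pvFmt, pv_if_s, hs, h1, e2, h2, e3, h3,
              h4, hm2, hsub1, hr1]
        · by_cases h4 : sec / 31536000 = 0
          · have e2 : sec / 60 / 60 = sec / 3600 := by omega
            have e3 : sec / 3600 / 24 = sec / 86400 := by omega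
            have e4 : sec / 86400 / 365 = sec / 31536000 := by omega
            have hm3 : sec / 86400 % 365 = sec / 86400 := by omega
            have hsub2 : sec / 3600 - sec / 86400 * 24 = sec / 3600 % 24 := by omega
            by_cases hr2 : (24:Int) ∣ sec / 3600 <;>
              simp [pvBuild, pvUnits, pvFormat, pvScan, pvFmt, pv_if_s, hs, h1, e2, h2, e3,
                h3, e4, h4, hm3, hsub2, hr2]
          · have e2 : sec / 60 / 60 = sec / 3600 := by omega
            have e3 : sec / 3600 / 24 = sec / 86400 := by omega
            have e4 : sec / 86400 / 365 = sec / 31536000 := by omega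
            have hsub3 : sec / 86400 - sec / 31536000 * 365 = sec / 86400 % 365 := by omega
            by_cases hr3 : (365:Int) ∣ sec / 86400 <;>
              simp [pvBuild, pvUnits, pvFormat, pvScan, pvFmt, pv_if_s, hs, h1, e2, h2, e3,
                h3, e4, h4, hsub3, hr3]
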